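-- pv_equiv track=rewrite | github.com/chamikagangul/Data-Structures-and-Algorithms | moraxtream6/w.py | findWalls
-- ===== SOURCE A (Python) =====
-- def findWalls(L):
--     maxLen = 0
--     maxSoFar = 0
--     maxSoFarI = 0
--     left = 0
--     right = 0
--     for i in range(len(L)-1):
--         height = L[i]
--         if(i-maxSoFarI>=maxLen):
--             maxLen = i-maxSoFarI
--             left = maxSoFarI
--             right = i
--
--
--
--         if(maxSoFar<height):
--             maxSoFar = height
--             maxSoFarI = i
--
--
--     return (left,right)
-- ===== SOURCE B (Python) =====
-- def findWalls(L):
--     # pass 1: pos[i] = index of the (strict, sentinel-0) running max over L[0..i-1]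
--     pos = []
--     m = cur = 0
--     for i in range(len(L) - 1):
--         pos.append(cur)
--         if L[i] > m:
--             m, cur = L[i], i
--     # pass 2: widest gap, last tie wins
--     best = left = right = 0
--     for i, p in enumerate(pos):
--         d = i - p
--         if d >= best:
--             best, left, right = d, p, i
--     return (left, right)
-- ===== Notes on version B (the rewrite author's own statement) =====
-- stated objective: alternative
-- what changed: A's single fused loop carrying five variables is split into two passes: one building a prefix table of running-max positions, then an enumerate scan of that table selecting the widest gap (last tie wins).
import Mathlib
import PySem

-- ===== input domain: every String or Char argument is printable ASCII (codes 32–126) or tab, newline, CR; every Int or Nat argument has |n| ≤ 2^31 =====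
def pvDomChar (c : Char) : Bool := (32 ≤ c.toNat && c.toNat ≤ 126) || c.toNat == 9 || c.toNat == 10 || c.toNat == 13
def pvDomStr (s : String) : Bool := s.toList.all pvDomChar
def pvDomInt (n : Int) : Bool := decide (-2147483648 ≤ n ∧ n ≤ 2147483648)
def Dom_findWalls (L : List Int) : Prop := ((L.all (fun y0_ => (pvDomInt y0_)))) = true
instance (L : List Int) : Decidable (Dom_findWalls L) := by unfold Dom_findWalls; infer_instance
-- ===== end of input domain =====

-- B replaces A's fused single loop by two passes (a prefix table of running-max
-- positions, then a scan for the widest gap); objective: alternative decomposition, same cost.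

-- ===== PORT A =====
-- one iteration of A's loop; state = (maxLen, maxSoFar, maxSoFarI, left, right)
def stepA (L : List Int) (st : Int × Int × Int × Int × Int) (i : Int) :
    Int × Int × Int × Int × Int :=
  let height := PySem.List.pyGetD L i 0
  let mlr := if i - st.2.2.1 ≥ st.1 then (i - st.2.2.1, st.2.2.1, i)
             else (st.1, st.2.2.2.1, st.2.2.2.2)
  let mm := if st.2.1 < height then (height, i) else (st.2.1, st.2.2.1)
  (mlr.1, mm.1, mm.2, mlr.2.1, mlr.2.2)

def findWalls (L : List Int) : Int × Int :=
  let s := (PySem.List.pyRange 0 ((L.length : Int) - 1) 1).foldl (stepA L) (0, 0, 0, 0, 0)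
  (s.2.2.2.1, s.2.2.2.2)

-- ===== PORT B =====
-- pass 1 step: append the current running-max index, then strict update of (m, cur)
def stepB1 (L : List Int) (st : List Int × Int × Int) (i : Int) : List Int × Int × Int :=
  (st.1 ++ [st.2.2],
   if st.2.1 < PySem.List.pyGetD L i 0 then (PySem.List.pyGetD L i 0, i) else st.2)

-- pass 2 step over enumerate pos; state = (best, left, right)
def stepB2 (st : Int × Int × Int) (ip : Int × Int) : Int × Int × Int :=
  let d := ip.1 - ip.2
  if d ≥ st.1 then (d, ip.2, ip.1) else st

def findWalls_alt (L : List Int) : Int × Int :=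
  let p := (PySem.List.pyRange 0 ((L.length : Int) - 1) 1).foldl (stepB1 L) ([], 0, 0)
  let s := (PySem.List.enumerate p.1 0).foldl stepB2 (0, 0, 0)
  (s.2.1, s.2.2)

-- ===== PRECONDITION & SPEC =====
def Spec_findWalls (L : List Int) (out : Int × Int) : Prop := out = findWalls_alt L
instance (L : List Int) (out : Int × Int) : Decidable (Spec_findWalls L out) := by unfold Spec_findWalls; infer_instance

-- ===== CLAIM (what is proved, stated in full; the proofs are below) =====
def Claim_equal_findWalls : Prop := ∀ (L : List Int), Dom_findWalls L → Spec_findWalls L (findWalls L)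

-- ===== LEMMAS AND PROOFS =====

-- loop invariant: after k iterations, B's two passes reproduce A's fused state
lemma findWalls_inv (L : List Int) (k : Nat) :
    ((PySem.List.pyRange 0 (k : Int) 1).foldl (stepB1 L) ([], 0, 0)).1.length = k
  ∧ ((PySem.List.pyRange 0 (k : Int) 1).foldl (stepB1 L) ([], 0, 0)).2 =
      (((PySem.List.pyRange 0 (k : Int) 1).foldl (stepA L) (0, 0, 0, 0, 0)).2.1,
       ((PySem.List.pyRange 0 (k : Int) 1).foldl (stepA L) (0, 0, 0, 0, 0)).2.2.1)
  ∧ (PySem.List.enumerate ((PySem.List.pyRange 0 (k : Int) 1).foldl (stepB1 L) ([], 0, 0)).1 0).foldl stepB2 (0, 0, 0) =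
      (((PySem.List.pyRange 0 (k : Int) 1).foldl (stepA L) (0, 0, 0, 0, 0)).1,
       ((PySem.List.pyRange 0 (k : Int) 1).foldl (stepA L) (0, 0, 0, 0, 0)).2.2.2) := by
  induction k with
  | zero =>
      simp [PySem.List.pyRange_one_eq_nil (le_refl 0)]
  | succ k ih =>
      obtain ⟨h1, h2, h3⟩ := ih
      have hr : PySem.List.pyRange 0 ((k + 1 : Nat) : Int) 1
          = PySem.List.pyRange 0 (k : Int) 1 ++ [(k : Int)] := by
        push_cast
        exact PySem.List.pyRange_one_succ_right (by positivity)
      rcases hP : (PySem.List.pyRange 0 (k : Int) 1).foldl (stepB1 L) ([], 0, 0) with ⟨pos, m, cur⟩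
      rcases hA : (PySem.List.pyRange 0 (k : Int) 1).foldl (stepA L) (0, 0, 0, 0, 0) with ⟨ml, ms, msi, l, r⟩
      rw [hP] at h1 h2 h3
      rw [hA] at h2 h3
      simp only at h1 h2 h3
      obtain ⟨hm, hc⟩ := Prod.mk.injEq .. ▸ h2
      subst hm hc
      rw [hr, List.foldl_append, List.foldl_append, hP, hA]
      refine ⟨?_, ?_, ?_⟩
      · simp [stepB1, h1]
      · simp only [List.foldl, stepB1, stepA]
      · simp only [List.foldl, stepB1]
        rw [PySem.List.enumerate_append, List.foldl_append, h3, h1]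
        simp only [PySem.List.enumerate_cons, PySem.List.enumerate_nil, List.foldl,
          stepB2, stepA]
        split_ifs <;> simp_all

-- ===== VERDICT (by name: the statement is the Claim_ definition above) =====
theorem findWalls_spec : Claim_equal_findWalls := by
  intro L _
  show findWalls L = findWalls_alt L
  cases L with
  | nil => decide
  | cons x xs =>
      have hn : (((x :: xs).length : Int) - 1) = ((xs.length : Nat) : Int) := by
        simp
      obtain ⟨h1, h2, h3⟩ := findWalls_inv (x :: xs) xs.length
      simp only [findWalls, findWalls_alt, hn, h3]
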